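-- pv_equiv track=rewrite | github.com/xiuwenz2/SAP-Hypo5 | utils/postprocessing.py | _find_min_repeat_unit_anywhere
-- ===== SOURCE A (Python) =====
-- from typing import List, Tuple, Optional, Dict, Any
--
-- def _find_min_repeat_unit_anywhere(
--     words: List[str],
--     max_unit_len: int = 8,
--     min_unit_len: int = 1,
--     min_repeats: int = 2,
-- ) -> Optional[Tuple[List[str], int, int, int]]:
--     """
--     Find a minimal repeating unit that appears as a contiguous run somewhere.
--     Among all runs, pick the one that covers the most tokens (run_tokens).
--     Return (unit_tokens, start_index, repeats, run_tokens), or None if not found.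
--     """
--     n = len(words)
--     if n == 0:
--         return None
--
--     best: Optional[Tuple[int, int, int, int, List[str]]] = None  # (run_tokens, -unit_len, start, repeats, unit)
--     i = 0
--     while i < n:
--         max_len_here = min(max_unit_len, (n - i) // max(1, min_repeats))
--         if max_len_here < min_unit_len:
--             i += 1
--             continue
--
--         for unit_len in range(min_unit_len, max_len_here + 1):
--             unit = words[i : i + unit_len]
--             repeats = 1
--             j = i + unit_len
--             while j + unit_len <= n and words[j : j + unit_len] == unit:
--                 repeats += 1
--                 j += unit_len
--             if repeats >= min_repeats:
--                 run_tokens = repeats * unit_len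
--                 cand = (run_tokens, -unit_len, i, repeats, unit)
--                 if best is None or cand > best:
--                     best = cand
--         i += 1
--
--     if best is None:
--         return None
--     run_tokens, neg_unit_len, start_idx, repeats, unit = best
--     return (unit, start_idx, repeats, run_tokens)
-- ===== SOURCE B (Python) =====
-- from typing import List, Tuple, Optional
--
-- def _find_min_repeat_unit_anywhere(
--     words: List[str],
--     max_unit_len: int = 8,
--     min_unit_len: int = 1,
--     min_repeats: int = 2,
-- ) -> Optional[Tuple[List[str], int, int, int]]:
--     """
--     Same result as the original, computed per period d in O(n) instead of
--     re-comparing whole blocks: a right-to-left running count r of consecutive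
--     positions with words[i] == words[i + d] gives the repeat count at i as
--     1 + r // d.
--     """
--     n = len(words)
--     if n == 0:
--         return None
--
--     denom = max(1, min_repeats)
--     best = None  # (run_tokens, -unit_len, start, repeats, unit)
--     for d in range(min_unit_len, min(max_unit_len, n // denom) + 1):
--         r = 0  # number of consecutive m >= i with words[m] == words[m + d]
--         for i in range(n - d, -1, -1):
--             if i + d < n:
--                 r = r + 1 if words[i] == words[i + d] else 0
--             if d <= (n - i) // denom:
--                 repeats = 1 + r // d
--                 if repeats >= min_repeats:
--                     cand = (repeats * d, -d, i, repeats, words[i:i + d])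
--                     if best is None or cand > best:
--                         best = cand
--
--     if best is None:
--         return None
--     return (best[4], best[2], best[3], best[0])
-- ===== Notes on version B (the rewrite author's own statement) =====
-- stated objective: faster
-- what changed: Iterates periods d in the outer loop and replaces A's per-start while-loop that re-compares whole candidate blocks by a right-to-left running count r of consecutive positions with words[i] == words[i+d], from which the repeat count at each start is 1 + r // d.
-- outside the precondition, e.g. on _find_min_repeat_unit_anywhere(['', 'a'], -1, -1, -1): A returns ([], 1, 1, -1), B raises IndexError; on _find_min_repeat_unit_anywhere(['a', 'a'], 2, 0, 2): A does not finish within the time limit, B raises ZeroDivisionError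
import Mathlib
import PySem

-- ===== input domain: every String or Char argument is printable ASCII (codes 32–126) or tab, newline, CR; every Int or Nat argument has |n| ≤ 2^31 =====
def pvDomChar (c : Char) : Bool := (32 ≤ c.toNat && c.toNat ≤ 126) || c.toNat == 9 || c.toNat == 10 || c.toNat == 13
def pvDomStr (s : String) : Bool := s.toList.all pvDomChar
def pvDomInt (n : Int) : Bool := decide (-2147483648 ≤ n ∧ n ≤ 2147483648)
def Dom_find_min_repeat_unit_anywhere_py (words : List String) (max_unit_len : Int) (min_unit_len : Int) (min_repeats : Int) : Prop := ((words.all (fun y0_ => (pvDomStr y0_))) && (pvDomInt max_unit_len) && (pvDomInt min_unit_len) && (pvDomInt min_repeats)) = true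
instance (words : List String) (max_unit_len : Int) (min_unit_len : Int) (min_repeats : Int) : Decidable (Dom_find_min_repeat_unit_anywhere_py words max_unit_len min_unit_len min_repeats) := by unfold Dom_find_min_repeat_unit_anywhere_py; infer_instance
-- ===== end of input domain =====

-- B iterates the period d in the outer loop and replaces A's per-start while-loop (which
-- re-compares whole candidate blocks) by a right-to-left running count r of consecutive
-- positions with words[i] == words[i+d]; the repeat count at start i is then 1 + r // d.

abbrev PVCand := Int × Int × Int × Int × List String

-- Python's `>` on a pair of lists of strings (lexicographic, a strict prefix is smaller)
def pyListStrGT : List String → List String → Bool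
  | _ :: _, [] => true
  | [], _ => false
  | x :: xs, y :: ys => if x = y then pyListStrGT xs ys else decide (y < x)

-- Python's `>` on the 5-tuples (run_tokens, -unit_len, start, repeats, unit)
def candGT (c b : PVCand) : Bool :=
  if c.1 = b.1 then
    if c.2.1 = b.2.1 then
      if c.2.2.1 = b.2.2.1 then
        if c.2.2.2.1 = b.2.2.2.1 then pyListStrGT c.2.2.2.2 b.2.2.2.2
        else decide (b.2.2.2.1 < c.2.2.2.1)
      else decide (b.2.2.1 < c.2.2.1)
    else decide (b.2.1 < c.2.1)
  else decide (b.1 < c.1)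

-- `if best is None or cand > best: best = cand`
def stepBest (best : Option PVCand) (c : PVCand) : Option PVCand :=
  match best with
  | none => some c
  | some b => if candGT c b then some c else some b

-- ===== PORT A =====
-- the inner `while` loop of A: counts how many further copies of `unit` follow.
-- fuel only makes the recursion total; with 1 ≤ unit_len (inside Pre_) it is never exhausted.
def whileRepA (words : List String) (n unit_len : Int) (unit : List String) : Nat → Int → Int → Int
  | 0, _, repeats => repeats
  | fuel + 1, j, repeats =>
    if j + unit_len ≤ n ∧ PySem.List.slice words (some j) (some (j + unit_len)) = unit then
      whileRepA words n unit_len unit fuel (j + unit_len) (repeats + 1)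
    else repeats

def find_min_repeat_unit_anywhere_py (words : List String) (max_unit_len : Int) (min_unit_len : Int) (min_repeats : Int) : Option (List String × Int × Int × Int) :=
  let n : Int := PySem.List.len words
  if n = 0 then none
  else
    let best : Option PVCand :=
      (PySem.List.pyRange 0 n 1).foldl (fun best i =>
        let max_len_here := min max_unit_len (PySem.Int.floordiv (n - i) (max 1 min_repeats))
        if max_len_here < min_unit_len then best
        else
          (PySem.List.pyRange min_unit_len (max_len_here + 1) 1).foldl (fun best unit_len =>
            let unit := PySem.List.slice words (some i) (some (i + unit_len))
            let repeats := whileRepA words n unit_len unit (words.length + 1) (i + unit_len) 1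
            if min_repeats ≤ repeats then
              stepBest best (repeats * unit_len, -unit_len, i, repeats, unit)
            else best) best) none
    match best with
    | none => none
    | some (run_tokens, _neg_unit_len, start_idx, repeats, unit) =>
      some (unit, start_idx, repeats, run_tokens)

-- ===== PORT B =====
-- the body of B's inner `for i in range(n - d, -1, -1)` loop; the state is (r, best)
def innerStepB (words : List String) (n d denom min_repeats : Int) (st : Int × Option PVCand) (i : Int) : Int × Option PVCand :=
  let r := if i + d < n then
             (if PySem.List.pyGetD words i "" = PySem.List.pyGetD words (i + d) "" then st.1 + 1 else 0)
           else st.1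
  let best :=
    if d ≤ PySem.Int.floordiv (n - i) denom then
      let repeats := 1 + PySem.Int.floordiv r d
      if min_repeats ≤ repeats then
        stepBest st.2 (repeats * d, -d, i, repeats, PySem.List.slice words (some i) (some (i + d)))
      else st.2
    else st.2
  (r, best)

def find_min_repeat_unit_anywhere_py_alt (words : List String) (max_unit_len : Int) (min_unit_len : Int) (min_repeats : Int) : Option (List String × Int × Int × Int) :=
  let n : Int := PySem.List.len words
  if n = 0 then none
  else
    let denom := max 1 min_repeats
    let best : Option PVCand :=
      (PySem.List.pyRange min_unit_len (min max_unit_len (PySem.Int.floordiv n denom) + 1) 1).foldl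
        (fun best d =>
          ((PySem.List.pyRange (n - d) (-1) (-1)).foldl
            (innerStepB words n d denom min_repeats) ((0 : Int), best)).2) none
    match best with
    | none => none
    | some (run_tokens, _neg_unit_len, start_idx, repeats, unit) =>
      some (unit, start_idx, repeats, run_tokens)

-- ===== PRECONDITION & SPEC =====
-- Pre_ excludes non-empty `words` with min_unit_len ≤ 0 whose unit-length range is non-empty:
-- A then iterates unit lengths ≤ 0 — diverging for unit length 0 (the inner while-loop never
-- advances) and, for negative unit lengths, returning artifacts of negative-length slices —
-- while B's period-based algorithm raises on those inputs (it needs a period d ≥ 1).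
def Pre_find_min_repeat_unit_anywhere_py (words : List String) (max_unit_len : Int) (min_unit_len : Int) (min_repeats : Int) : Prop :=
  words = [] ∨ 1 ≤ min_unit_len ∨
    min max_unit_len (PySem.Int.floordiv (PySem.List.len words) (max 1 min_repeats)) < min_unit_len
instance (words : List String) (max_unit_len : Int) (min_unit_len : Int) (min_repeats : Int) : Decidable (Pre_find_min_repeat_unit_anywhere_py words max_unit_len min_unit_len min_repeats) := by unfold Pre_find_min_repeat_unit_anywhere_py; infer_instance

def pvWitness_find_min_repeat_unit_anywhere_py : List String × Int × Int × Int := (["a", "b", "a", "b"], 8, 1, 2)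

def Spec_find_min_repeat_unit_anywhere_py (words : List String) (max_unit_len : Int) (min_unit_len : Int) (min_repeats : Int) (out : Option (List String × Int × Int × Int)) : Prop := out = find_min_repeat_unit_anywhere_py_alt words max_unit_len min_unit_len min_repeats
instance (words : List String) (max_unit_len : Int) (min_unit_len : Int) (min_repeats : Int) (out : Option (List String × Int × Int × Int)) : Decidable (Spec_find_min_repeat_unit_anywhere_py words max_unit_len min_unit_len min_repeats out) := by unfold Spec_find_min_repeat_unit_anywhere_py; infer_instance

-- ===== CLAIM (what is proved, stated in full; the proofs are below) =====
def Claim_equal_find_min_repeat_unit_anywhere_py : Prop := ∀ (words : List String) (max_unit_len : Int) (min_unit_len : Int) (min_repeats : Int), Dom_find_min_repeat_unit_anywhere_py words max_unit_len min_unit_len min_repeats → Pre_find_min_repeat_unit_anywhere_py words max_unit_len min_unit_len min_repeats → Spec_find_min_repeat_unit_anywhere_py words max_unit_len min_unit_len min_repeats (find_min_repeat_unit_anywhere_py words max_unit_len min_unit_len min_repeats)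

-- ===== LEMMAS AND PROOFS =====

theorem pyListStrGT_irrefl : ∀ a : List String, pyListStrGT a a = false := by
  intro a
  induction a with
  | nil => rfl
  | cons x xs ih => simp [pyListStrGT, ih]

theorem pyListStrGT_trans : ∀ a b c : List String,
    pyListStrGT a b = true → pyListStrGT b c = true → pyListStrGT a c = true := by
  intro a
  induction a with
  | nil => intro b c h; cases b <;> simp [pyListStrGT] at h
  | cons x xs ih =>
    intro b c h1 h2
    cases b with
    | nil => cases c <;> simp [pyListStrGT] at h2
    | cons y ys =>
      cases c with
      | nil => simp [pyListStrGT]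
      | cons z zs =>
        simp only [pyListStrGT] at h1 h2 ⊢
        by_cases hxy : x = y <;> by_cases hyz : y = z
        · subst hxy; subst hyz
          simp_all
          exact ih _ _ h1 h2
        · subst hxy; simp_all
        · subst hyz; simp_all
        · simp_all
          by_cases hxz : x = z
          · subst hxz; exact absurd (lt_trans h2 h1) (lt_irrefl _)
          · simp [hxz]; exact lt_trans h2 h1

theorem pyListStrGT_total : ∀ a b : List String, a ≠ b →
    pyListStrGT a b = true ∨ pyListStrGT b a = true := by
  intro a
  induction a with
  | nil => intro b hb; cases b with
    | nil => simp at hb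
    | cons y ys => right; rfl
  | cons x xs ih =>
    intro b hb
    cases b with
    | nil => left; rfl
    | cons y ys =>
      by_cases hxy : x = y
      · subst hxy
        have : xs ≠ ys := by intro h; exact hb (by rw [h])
        rcases ih ys this with h | h
        · left; simp [pyListStrGT, h]
        · right; simp [pyListStrGT, h]
      · rcases lt_or_gt_of_ne hxy with h | h
        · right; simp [pyListStrGT, Ne.symm hxy, h]
        · left; simp [pyListStrGT, hxy, h]

theorem candGT_irrefl (a : Int × Int × Int × Int × List String) : candGT a a = false := by
  simp [candGT, pyListStrGT_irrefl]

def lexStep (x y : Int) (r : Bool) : Bool := if x = y then r else decide (y < x)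

theorem lexStep_trans {x y z : Int} {rxy ryz rxz : Bool}
    (hr : rxy = true → ryz = true → rxz = true)
    (h1 : lexStep x y rxy = true) (h2 : lexStep y z ryz = true) :
    lexStep x z rxz = true := by
  unfold lexStep at *
  by_cases hxy : x = y <;> by_cases hyz : y = z
  · subst hxy; subst hyz; simp_all
  · subst hxy; simp_all
  · subst hyz; simp_all
  · rw [if_neg hxy] at h1; rw [if_neg hyz] at h2
    have h2' : z < y := by simpa using h2
    have h1' : y < x := by simpa using h1
    have hzx : z < x := lt_trans h2' h1'
    have hxz : ¬ x = z := by omega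
    rw [if_neg hxz]; simpa using hzx

theorem lexStep_total {x y : Int} {rxy ryx : Bool}
    (hr : x = y → rxy = true ∨ ryx = true) :
    lexStep x y rxy = true ∨ lexStep y x ryx = true := by
  unfold lexStep
  by_cases hxy : x = y
  · subst hxy; simpa using hr rfl
  · rw [if_neg hxy, if_neg (Ne.symm hxy)]
    simp only [decide_eq_true_eq]
    omega

theorem candGT_eq_lexStep (a b : Int × Int × Int × Int × List String) :
    candGT a b = lexStep a.1 b.1 (lexStep a.2.1 b.2.1 (lexStep a.2.2.1 b.2.2.1
      (lexStep a.2.2.2.1 b.2.2.2.1 (pyListStrGT a.2.2.2.2 b.2.2.2.2)))) := rfl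

theorem candGT_trans (a b c : Int × Int × Int × Int × List String)
    (h1 : candGT a b = true) (h2 : candGT b c = true) : candGT a c = true := by
  rw [candGT_eq_lexStep] at h1 h2 ⊢
  refine lexStep_trans (fun u1 v1 => ?_) h1 h2
  refine lexStep_trans (fun u2 v2 => ?_) u1 v1
  refine lexStep_trans (fun u3 v3 => ?_) u2 v2
  refine lexStep_trans (fun u4 v4 => ?_) u3 v3
  exact pyListStrGT_trans _ _ _ u4 v4

theorem candGT_total (a b : Int × Int × Int × Int × List String) (hne : a ≠ b) :
    candGT a b = true ∨ candGT b a = true := by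
  rw [candGT_eq_lexStep, candGT_eq_lexStep]
  refine lexStep_total (fun e1 => ?_)
  refine lexStep_total (fun e2 => ?_)
  refine lexStep_total (fun e3 => ?_)
  refine lexStep_total (fun e4 => ?_)
  have h5 : a.2.2.2.2 ≠ b.2.2.2.2 := by
    intro h5
    apply hne
    obtain ⟨a1,a2,a3,a4,a5⟩ := a; obtain ⟨b1,b2,b3,b4,b5⟩ := b
    simp_all
  exact pyListStrGT_total _ _ h5

theorem candGT_asymm (a b : Int × Int × Int × Int × List String)
    (h : candGT a b = true) : candGT b a = false := by
  cases hh : candGT b a with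
  | false => rfl
  | true =>
    have := candGT_trans a b a h hh
    rw [candGT_irrefl] at this; cases this

theorem foldl_stepBest_eq_none :
    ∀ (L : List PVCand) (b : Option PVCand), L.foldl stepBest b = none → b = none ∧ L = [] := by
  intro L
  induction L with
  | nil => intro b h; exact ⟨h, rfl⟩
  | cons x xs ih =>
    intro b h
    have h2 := (ih (stepBest b x) h).1
    exfalso
    cases b with
    | none => simp [stepBest] at h2
    | some z => simp only [stepBest] at h2; split at h2 <;> simp at h2

theorem foldl_stepBest_mem :
    ∀ (L : List PVCand) (b : Option PVCand) (c : PVCand),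
      L.foldl stepBest b = some c → b = some c ∨ c ∈ L := by
  intro L
  induction L with
  | nil => intro b c h; exact Or.inl h
  | cons x xs ih =>
    intro b c h
    rcases ih (stepBest b x) c h with h1 | h1
    · cases b with
      | none =>
        simp only [stepBest] at h1
        right
        obtain rfl : x = c := Option.some_inj.mp h1
        exact List.mem_cons_self
      | some z =>
        simp only [stepBest] at h1
        split at h1
        · right; rw [Option.some_inj] at h1; simp [h1.symm]
        · left; exact h1
    · right; exact List.mem_cons_of_mem _ h1

theorem foldl_stepBest_improve :
    ∀ (L : List PVCand) (z c : PVCand),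
      L.foldl stepBest (some z) = some c → c = z ∨ candGT c z = true := by
  intro L
  induction L with
  | nil =>
    intro z c h
    simp only [List.foldl_nil, Option.some_inj] at h
    left; exact h.symm
  | cons x xs ih =>
    intro z c h
    simp only [List.foldl_cons, stepBest] at h
    split at h
    · rcases ih x c h with h1 | h1
      · right; rw [h1]; assumption
      · right; exact candGT_trans _ _ _ h1 (by assumption)
    · exact ih z c h

theorem foldl_stepBest_unbeaten :
    ∀ (L : List PVCand) (b : Option PVCand) (c : PVCand),
      L.foldl stepBest b = some c →
      (∀ y ∈ L, candGT y c = false) ∧ (∀ z, b = some z → candGT z c = false) := by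
  intro L
  induction L with
  | nil =>
    intro b c h
    refine ⟨by simp, ?_⟩
    intro z hz
    rw [hz] at h
    simp only [List.foldl_nil, Option.some_inj] at h
    rw [h]; exact candGT_irrefl c
  | cons x xs ih =>
    intro b c h
    simp only [List.foldl_cons] at h
    obtain ⟨ihL, ihb⟩ := ih (stepBest b x) c h
    constructor
    · intro y hy
      rcases List.mem_cons.mp hy with heq | hy'
      · -- y = x
        rw [heq]
        cases b with
        | none => exact ihb _ rfl
        | some z =>
          simp only [stepBest] at ihb h
          by_cases hgt : candGT x z = true
          · rw [if_pos hgt] at ihb; exact ihb _ rfl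
          · rw [if_neg hgt] at h ihb
            -- best stayed z; show candGT x c = false
            cases hxc : candGT x c with
            | false => rfl
            | true =>
              exfalso
              rcases foldl_stepBest_improve xs z c h with heq2 | himp
              · rw [heq2] at hxc; exact hgt hxc
              · exact hgt (candGT_trans _ _ _ hxc himp)
      · exact ihL y hy'
    · intro z hz
      subst hz
      simp only [stepBest] at ihb h
      by_cases hgt : candGT x z = true
      · rw [if_pos hgt] at ihb h
        cases hzc : candGT z c with
        | false => rfl
        | true =>
          exfalso
          have hzx : candGT z x = false := candGT_asymm _ _ hgt
          rcases foldl_stepBest_improve xs x c h with heq2 | himp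
          · rw [heq2] at hzc; rw [hzx] at hzc; cases hzc
          · have := candGT_trans _ _ _ hzc himp
            rw [hzx] at this; cases this
      · rw [if_neg hgt] at ihb; exact ihb z rfl

def runF (w : List String) (d k : Nat) : Nat :=
  if h : k + d < w.length ∧ w.getD k "" = w.getD (k + d) "" then runF w d (k + 1) + 1 else 0
termination_by w.length - k
decreasing_by omega

theorem runF_ge_iff (w : List String) (d : Nat) :
    ∀ (t k : Nat), t ≤ runF w d k ↔
      ∀ p < t, k + p + d < w.length ∧ w.getD (k + p) "" = w.getD (k + p + d) "" := by
  intro t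
  induction t with
  | zero => intro k; simp
  | succ t ih =>
    intro k
    rw [runF]
    by_cases hc : k + d < w.length ∧ w.getD k "" = w.getD (k + d) ""
    · rw [dif_pos hc]
      constructor
      · intro h p hp
        rcases Nat.eq_zero_or_pos p with rfl | hpos
        · simpa using hc
        · have h2 : t ≤ runF w d (k + 1) := by omega
          have := (ih (k + 1)).mp h2 (p - 1) (by omega)
          have e1 : k + 1 + (p - 1) = k + p := by omega
          rw [e1] at this
          exact this
      · intro h
        have h0 := h 0 (by omega)
        have ht : t ≤ runF w d (k + 1) := by
          apply (ih (k + 1)).mpr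
          intro p hp
          have := h (p + 1) (by omega)
          have e1 : k + (p + 1) = k + 1 + p := by omega
          rw [e1] at this
          exact this
        omega
    · rw [dif_neg hc]
      constructor
      · intro h; omega
      · intro h
        exfalso
        have h0 := h 0 (by omega)
        simp at h0
        exact hc ⟨h0.1, h0.2⟩

theorem runF_add (w : List String) (d : Nat) :
    ∀ (t k : Nat),
      (∀ p < t, k + p + d < w.length ∧ w.getD (k + p) "" = w.getD (k + p + d) "") →
      runF w d k = t + runF w d (k + t) := by
  intro t
  induction t with
  | zero => intro k _; simp
  | succ t ih =>
    intro k h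
    have h0 := h 0 (by omega)
    simp only [Nat.add_zero] at h0
    rw [runF, dif_pos h0]
    have := ih (k + 1) (by
      intro p hp
      have := h (p + 1) (by omega)
      have e1 : k + (p + 1) = k + 1 + p := by omega
      rw [e1] at this
      exact this)
    rw [this]
    have e2 : k + 1 + t = k + (t + 1) := by omega
    rw [e2]
    omega

theorem runF_zero_of (w : List String) (d k : Nat) (h : w.length ≤ k + d) : runF w d k = 0 := by
  rw [runF, dif_neg]
  intro hc
  omega

theorem blockEq_iff (w : List String) (d m : Nat) (hd : 1 ≤ d) (hm : m + d ≤ w.length) :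
    d ≤ runF w d m ↔
      (m + 2 * d ≤ w.length ∧ (w.drop (m + d)).take d = (w.drop m).take d) := by
  rw [runF_ge_iff]
  constructor
  · intro h
    have hb : m + 2 * d ≤ w.length := by
      have := (h (d - 1) (by omega)).1
      omega
    refine ⟨hb, ?_⟩
    apply List.ext_getElem
    · simp only [List.length_take, List.length_drop]
      omega
    · intro i hi1 hi2
      simp only [List.length_take, List.length_drop] at hi1
      have hid : i < d := by omega
      have hp := (h i hid).2
      have ha : m + i < w.length := by omega
      have hb' : m + i + d < w.length := (h i hid).1
      rw [List.getD_eq_getElem w "" ha, List.getD_eq_getElem w "" hb'] at hp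
      simp only [List.getElem_take, List.getElem_drop]
      have e1 : m + d + i = m + i + d := by omega
      simp only [e1]
      exact hp.symm
  · rintro ⟨hb, heq⟩
    intro p hp
    have hb' : m + p + d < w.length := by omega
    refine ⟨hb', ?_⟩
    have hlen1 : p < ((w.drop (m + d)).take d).length := by
      simp only [List.length_take, List.length_drop]; omega
    have := List.getElem_of_eq heq hlen1
    simp only [List.getElem_take, List.getElem_drop] at this
    have ha : m + p < w.length := by omega
    rw [List.getD_eq_getElem w "" (by omega : m + p < w.length),
        List.getD_eq_getElem w "" hb']
    rw [← this]
    congr 1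
    omega

theorem whileRepA_eq (w : List String) (d : Nat) (hd : 1 ≤ d) (unit : List String) :
    ∀ (fuel m : Nat) (r : Int), m + d ≤ w.length → w.length - m ≤ fuel →
      (w.drop m).take d = unit →
      whileRepA w (w.length : Int) (d : Int) unit fuel (((m + d : Nat) : Int)) r
        = r + ((runF w d m / d : Nat) : Int) := by
  intro fuel
  induction fuel with
  | zero => intro m r hm hf _; omega
  | succ fuel ih =>
    intro m r hm hf hu
    simp only [whileRepA]
    have hslice : PySem.List.slice w (some ((m + d : Nat) : Int)) (some (((m + d : Nat) : Int) + (d : Int)))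
        = (w.drop (m + d)).take d := PySem.List.slice_natCast_add w (m + d) d
    by_cases hrun : d ≤ runF w d m
    · obtain ⟨hb, hteq⟩ := (blockEq_iff w d m hd hm).mp hrun
      rw [if_pos]
      · have e1 : ((m + d : Nat) : Int) + (d : Int) = (((m + d) + d : Nat) : Int) := by push_cast; ring
        rw [e1]
        have := ih (m + d) (r + 1) (by omega) (by omega) (hteq.trans hu)
        rw [this]
        have hsum : runF w d m = d + runF w d (m + d) := by
          apply runF_add w d d m
          intro p hp
          exact (runF_ge_iff w d d m).mp hrun p hp
        have hdiv : runF w d m / d = runF w d (m + d) / d + 1 := by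
          rw [hsum, Nat.add_comm d (runF w d (m + d)), Nat.add_div_right _ (by omega : 0 < d)]
        rw [hdiv]
        push_cast
        ring
      · constructor
        · push_cast; omega
        · rw [hslice, hteq]; exact hu
    · rw [if_neg]
      · have : runF w d m / d = 0 := Nat.div_eq_of_lt (by omega)
        rw [this]
        simp
      · intro hcond
        apply hrun
        apply (blockEq_iff w d m hd hm).mpr
        constructor
        · have := hcond.1; push_cast at this; omega
        · rw [hslice] at hcond
          rw [hcond.2, hu]

-- repeat count and candidate tuple of start i with period d, expressed through runF
def pvRep (w : List String) (d i : Nat) : Int := 1 + ((runF w d i / d : Nat) : Int)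

def pvCand (w : List String) (d i : Nat) : PVCand :=
  (pvRep w d i * (d : Int), -(d : Int), (i : Int), pvRep w d i, (w.drop i).take d)

-- the common candidate set both programs maximise over
def pvSCond (w : List String) (mu mi mr : Int) (c : PVCand) : Prop :=
  ∃ d i : Nat, 1 ≤ d ∧ mi ≤ (d : Int) ∧ (i : Int) < (w.length : Int) ∧
    (d : Int) ≤ min mu (PySem.Int.floordiv ((w.length : Int) - (i : Int)) (max 1 mr)) ∧
    mr ≤ pvRep w d i ∧ c = pvCand w d i

-- A's inner-loop body as an optional candidate
def gA (w : List String) (mr : Int) (iI dl : Int) : Option PVCand :=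
  if mr ≤ whileRepA w (PySem.List.len w) dl (PySem.List.slice w (some iI) (some (iI + dl))) (w.length + 1) (iI + dl) 1 then
    some (whileRepA w (PySem.List.len w) dl (PySem.List.slice w (some iI) (some (iI + dl))) (w.length + 1) (iI + dl) 1 * dl,
      -dl, iI,
      whileRepA w (PySem.List.len w) dl (PySem.List.slice w (some iI) (some (iI + dl))) (w.length + 1) (iI + dl) 1,
      PySem.List.slice w (some iI) (some (iI + dl)))
  else none

def pvLA (w : List String) (mu mi mr : Int) : List PVCand :=
  (PySem.List.pyRange 0 (PySem.List.len w) 1).flatMap (fun iI =>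
    (PySem.List.pyRange mi (min mu (PySem.Int.floordiv (PySem.List.len w - iI) (max 1 mr)) + 1) 1).filterMap
      (gA w mr iI))

-- B's inner-loop body as an optional candidate (r replaced by its invariant value runF)
def gB (w : List String) (mr : Int) (d : Nat) (iI : Int) : Option PVCand :=
  if (d : Int) ≤ PySem.Int.floordiv ((w.length : Int) - iI) (max 1 mr) then
    if mr ≤ 1 + PySem.Int.floordiv ((runF w d iI.toNat : Nat) : Int) (d : Int) then
      some ((1 + PySem.Int.floordiv ((runF w d iI.toNat : Nat) : Int) (d : Int)) * (d : Int), -(d : Int), iI,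
        1 + PySem.Int.floordiv ((runF w d iI.toNat : Nat) : Int) (d : Int),
        PySem.List.slice w (some iI) (some (iI + (d : Int))))
    else none
  else none

def pvLB (w : List String) (mu mi mr : Int) : List PVCand :=
  (PySem.List.pyRange mi (min mu (PySem.Int.floordiv ((w.length : Int)) (max 1 mr)) + 1) 1).flatMap
    (fun dI => (PySem.List.pyRange ((w.length : Int) - dI) (-1) (-1)).filterMap (gB w mr dI.toNat))

theorem A_best_eq (w : List String) (mu mi mr : Int) :
    (PySem.List.pyRange 0 (PySem.List.len w) 1).foldl (fun best i =>
        if min mu (PySem.Int.floordiv (PySem.List.len w - i) (max 1 mr)) < mi then best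
        else
          (PySem.List.pyRange mi (min mu (PySem.Int.floordiv (PySem.List.len w - i) (max 1 mr)) + 1) 1).foldl
            (fun best unit_len =>
              if mr ≤ whileRepA w (PySem.List.len w) unit_len (PySem.List.slice w (some i) (some (i + unit_len))) (w.length + 1) (i + unit_len) 1 then
                stepBest best
                  (whileRepA w (PySem.List.len w) unit_len (PySem.List.slice w (some i) (some (i + unit_len))) (w.length + 1) (i + unit_len) 1 * unit_len,
                   -unit_len, i,
                   whileRepA w (PySem.List.len w) unit_len (PySem.List.slice w (some i) (some (i + unit_len))) (w.length + 1) (i + unit_len) 1,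
                   PySem.List.slice w (some i) (some (i + unit_len)))
              else best) best) none
    = List.foldl stepBest none (pvLA w mu mi mr) := by
  unfold pvLA
  rw [List.foldl_flatMap]
  apply PySem.List.foldl_congr_mem
  intro acc iI _
  by_cases hml : min mu (PySem.Int.floordiv (PySem.List.len w - iI) (max 1 mr)) < mi
  · rw [if_pos hml]
    rw [PySem.List.pyRange_one_eq_nil (by omega)]
    simp
  · rw [if_neg hml]
    rw [List.foldl_filterMap]
    apply PySem.List.foldl_congr_mem
    intro acc2 dl _
    unfold gA
    by_cases hr : mr ≤ whileRepA w (PySem.List.len w) dl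
        (PySem.List.slice w (some iI) (some (iI + dl))) (w.length + 1) (iI + dl) 1
    · rw [if_pos hr, if_pos hr]
    · rw [if_neg hr, if_neg hr]

theorem innerStepB_step (w : List String) (mr : Int) (d : Nat) (j : Nat)
    (hj : j + d ≤ w.length) (b : Option PVCand) :
    innerStepB w (w.length : Int) (d : Int) (max 1 mr) mr (((runF w d (j + 1) : Nat) : Int), b) (j : Int)
      = (((runF w d j : Nat) : Int),
          match gB w mr d (j : Int) with
          | some c => stepBest b c
          | none => b) := by
  have hcast : (j : Int) + (d : Int) = ((j + d : Nat) : Int) := by push_cast; ring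
  have hr : (if (j : Int) + (d : Int) < ((w.length : Nat) : Int) then
        (if PySem.List.pyGetD w (j : Int) "" = PySem.List.pyGetD w ((j : Int) + (d : Int)) "" then
          (((runF w d (j + 1) : Nat) : Int)) + 1 else 0)
      else (((runF w d (j + 1) : Nat) : Int))) = ((runF w d j : Nat) : Int) := by
    by_cases hjd : j + d < w.length
    · rw [if_pos (by push_cast; omega)]
      rw [hcast, PySem.List.pyGetD_natCast, PySem.List.pyGetD_natCast]
      by_cases heq : w.getD j "" = w.getD (j + d) ""
      · rw [if_pos heq]
        conv_rhs => rw [runF, dif_pos ⟨hjd, heq⟩]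
        push_cast; ring
      · rw [if_neg heq]
        conv_rhs => rw [runF, dif_neg (show ¬(j + d < w.length ∧ w.getD j "" = w.getD (j + d) "") by intro hc; exact heq hc.2)]
        simp
    · have hje : j + d = w.length := by omega
      rw [if_neg (by push_cast; omega)]
      rw [runF_zero_of w d (j + 1) (by omega), runF_zero_of w d j (by omega)]
  simp only [innerStepB, gB, Int.toNat_natCast]
  rw [hr]
  by_cases hc1 : (d : Int) ≤ PySem.Int.floordiv ((w.length : Int) - (j : Int)) (max 1 mr)
  · rw [if_pos hc1, if_pos hc1]
    by_cases hc2 : mr ≤ 1 + PySem.Int.floordiv ((runF w d j : Nat) : Int) (d : Int)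
    · rw [if_pos hc2, if_pos hc2]
    · rw [if_neg hc2, if_neg hc2]
  · rw [if_neg hc1, if_neg hc1]

theorem B_inner_eq (w : List String) (mr : Int) (d : Nat) :
    ∀ (j : Nat), j + d ≤ w.length → ∀ (b : Option PVCand),
      ((PySem.List.pyRange (j : Int) (-1) (-1)).foldl
        (innerStepB w (w.length : Int) (d : Int) (max 1 mr) mr)
        (((runF w d (j + 1) : Nat) : Int), b)).2
      = List.foldl stepBest b ((PySem.List.pyRange (j : Int) (-1) (-1)).filterMap (gB w mr d)) := by
  intro j
  induction j with
  | zero =>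
    intro hj b
    rw [PySem.List.pyRange_neg_one_cons (by simp)]
    have htail : PySem.List.pyRange (((0 : Nat) : Int) - 1) (-1) (-1) = [] :=
      PySem.List.pyRange_neg_one_eq_nil (by simp)
    rw [htail]
    simp only [List.foldl_cons, List.foldl_nil, List.filterMap_cons, List.filterMap_nil]
    rw [innerStepB_step w mr d 0 hj b]
    cases hg : gB w mr d ((0 : Nat) : Int) with
    | none => simp
    | some c => simp
  | succ j ih =>
    intro hj b
    rw [PySem.List.pyRange_neg_one_cons (by push_cast; omega)]
    have htail : ((j + 1 : Nat) : Int) - 1 = (j : Int) := by push_cast; ring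
    rw [htail]
    simp only [List.foldl_cons, List.filterMap_cons]
    rw [innerStepB_step w mr d (j + 1) hj b]
    cases hg : gB w mr d ((j + 1 : Nat) : Int) with
    | none =>
      simp only []
      exact ih (by omega) b
    | some c =>
      simp only [List.foldl_cons]
      exact ih (by omega) (stepBest b c)

theorem B_best_eq (w : List String) (mu mi mr : Int) (hmi : 1 ≤ mi) :
    (PySem.List.pyRange mi (min mu (PySem.Int.floordiv (PySem.List.len w) (max 1 mr)) + 1) 1).foldl
      (fun best d => ((PySem.List.pyRange (PySem.List.len w - d) (-1) (-1)).foldl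
          (innerStepB w (PySem.List.len w) d (max 1 mr) mr) ((0 : Int), best)).2) none
    = List.foldl stepBest none (pvLB w mu mi mr) := by
  have hlen : PySem.List.len w = ((w.length : Nat) : Int) := PySem.List.len_eq w
  rw [hlen]
  unfold pvLB
  rw [List.foldl_flatMap]
  apply PySem.List.foldl_congr_mem
  intro acc dI hdI
  rw [PySem.List.mem_pyRange_one] at hdI
  have hdenom : (0 : Int) < max 1 mr := by omega
  have hfle : PySem.Int.floordiv ((w.length : Int)) (max 1 mr) ≤ (w.length : Int) := by
    rw [PySem.Int.floordiv_eq_ediv_of_pos hdenom]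
    exact Int.ediv_le_self _ (by positivity)
  have hd1 : 1 ≤ dI := le_trans hmi hdI.1
  have hdn : dI ≤ (w.length : Int) := by
    have := hdI.2
    omega
  obtain ⟨d, rfl⟩ : ∃ k : Nat, dI = (k : Int) := ⟨dI.toNat, (Int.toNat_of_nonneg (by omega)).symm⟩
  have hdnat : d ≤ w.length := by exact_mod_cast hdn
  have hsub : (w.length : Int) - (d : Int) = ((w.length - d : Nat) : Int) := by push_cast [hdnat]; ring
  have hzero : (0 : Int) = ((runF w d ((w.length - d) + 1) : Nat) : Int) := by
    rw [runF_zero_of w d ((w.length - d) + 1) (by omega)]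
    simp
  rw [hsub, hzero, Int.toNat_natCast]
  exact B_inner_eq w mr d (w.length - d) (by omega) acc

theorem gA_eq (w : List String) (mr : Int) (i d : Nat) (hd : 1 ≤ d) (hid : i + d ≤ w.length) :
    gA w mr (i : Int) (d : Int)
      = if mr ≤ pvRep w d i then some (pvCand w d i) else none := by
  unfold gA
  have hcast : (i : Int) + (d : Int) = ((i + d : Nat) : Int) := by push_cast; ring
  have hu : PySem.List.slice w (some (i : Int)) (some ((i : Int) + (d : Int))) = (w.drop i).take d :=
    PySem.List.slice_natCast_add w i d
  have hrep : whileRepA w (PySem.List.len w) (d : Int)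
      (PySem.List.slice w (some (i : Int)) (some ((i : Int) + (d : Int)))) (w.length + 1) ((i : Int) + (d : Int)) 1
      = pvRep w d i := by
    rw [hu, PySem.List.len_eq, hcast]
    exact whileRepA_eq w d hd ((w.drop i).take d) (w.length + 1) i 1 hid (by omega) rfl
  rw [hrep, hu]
  rfl

theorem gB_eq (w : List String) (mr : Int) (i d : Nat) :
    gB w mr d (i : Int)
      = if ((d : Int) ≤ PySem.Int.floordiv ((w.length : Int) - (i : Int)) (max 1 mr) ∧ mr ≤ pvRep w d i)
        then some (pvCand w d i) else none := by
  unfold gB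
  have hu : PySem.List.slice w (some (i : Int)) (some ((i : Int) + (d : Int))) = (w.drop i).take d :=
    PySem.List.slice_natCast_add w i d
  have hrep : (1 : Int) + PySem.Int.floordiv ((runF w d ((i : Int).toNat) : Nat) : Int) (d : Int) = pvRep w d i := by
    rw [Int.toNat_natCast, PySem.Int.floordiv_natCast]
    rfl
  rw [hrep, hu]
  by_cases hc1 : (d : Int) ≤ PySem.Int.floordiv ((w.length : Int) - (i : Int)) (max 1 mr)
  · rw [if_pos hc1]
    by_cases hc2 : mr ≤ pvRep w d i
    · rw [if_pos hc2, if_pos ⟨hc1, hc2⟩]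
      rfl
    · rw [if_neg hc2, if_neg (by tauto)]
  · rw [if_neg hc1, if_neg (by tauto)]

theorem memA (w : List String) (mu mi mr : Int) (hmi : 1 ≤ mi) (c : PVCand) :
    c ∈ pvLA w mu mi mr ↔ pvSCond w mu mi mr c := by
  have hdenom : (0 : Int) < max 1 mr := by omega
  unfold pvLA
  simp only [List.mem_flatMap, List.mem_filterMap, PySem.List.mem_pyRange_one, PySem.List.len_eq]
  constructor
  · rintro ⟨iI, ⟨hi0, hilt⟩, dl, ⟨hdl1, hdl2⟩, hg⟩
    obtain ⟨i, rfl⟩ : ∃ k : Nat, iI = (k : Int) := ⟨iI.toNat, (Int.toNat_of_nonneg hi0).symm⟩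
    obtain ⟨d, rfl⟩ : ∃ k : Nat, dl = (k : Int) := ⟨dl.toNat, (Int.toNat_of_nonneg (by omega)).symm⟩
    have hd1 : 1 ≤ d := by exact_mod_cast le_trans hmi hdl1
    have hfl : PySem.Int.floordiv ((w.length : Int) - (i : Int)) (max 1 mr) ≤ (w.length : Int) - (i : Int) := by
      rw [PySem.Int.floordiv_eq_ediv_of_pos hdenom]
      exact Int.ediv_le_self _ (by omega)
    have hdle : (d : Int) ≤ min mu (PySem.Int.floordiv ((w.length : Int) - (i : Int)) (max 1 mr)) := by omega
    have hid : i + d ≤ w.length := by omega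
    rw [gA_eq w mr i d hd1 hid] at hg
    split at hg
    · exact ⟨d, i, hd1, hdl1, hilt, hdle, by assumption, (Option.some_inj.mp hg).symm⟩
    · simp at hg
  · rintro ⟨d, i, hd1, hmid, hilt, hdle, hmr, rfl⟩
    have hfl : PySem.Int.floordiv ((w.length : Int) - (i : Int)) (max 1 mr) ≤ (w.length : Int) - (i : Int) := by
      rw [PySem.Int.floordiv_eq_ediv_of_pos hdenom]
      exact Int.ediv_le_self _ (by omega)
    have hid : i + d ≤ w.length := by omega
    refine ⟨(i : Int), ⟨Int.natCast_nonneg i, hilt⟩, (d : Int), ⟨hmid, by omega⟩, ?_⟩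
    rw [gA_eq w mr i d hd1 hid, if_pos hmr]

theorem memB (w : List String) (mu mi mr : Int) (hmi : 1 ≤ mi) (c : PVCand) :
    c ∈ pvLB w mu mi mr ↔ pvSCond w mu mi mr c := by
  have hdenom : (0 : Int) < max 1 mr := by omega
  unfold pvLB
  simp only [List.mem_flatMap, List.mem_filterMap, PySem.List.mem_pyRange_one,
    PySem.List.mem_pyRange_neg_one]
  constructor
  · rintro ⟨dI, ⟨hdl1, hdl2⟩, iI, ⟨hi0, hile⟩, hg⟩
    obtain ⟨d, rfl⟩ : ∃ k : Nat, dI = (k : Int) := ⟨dI.toNat, (Int.toNat_of_nonneg (by omega)).symm⟩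
    obtain ⟨i, rfl⟩ : ∃ k : Nat, iI = (k : Int) := ⟨iI.toNat, (Int.toNat_of_nonneg (by omega)).symm⟩
    have hd1 : 1 ≤ d := by exact_mod_cast le_trans hmi hdl1
    rw [Int.toNat_natCast, gB_eq w mr i d] at hg
    split at hg
    · rename_i hcond
      refine ⟨d, i, hd1, hdl1, by omega, ?_, hcond.2, (Option.some_inj.mp hg).symm⟩
      have hmu : (d : Int) ≤ mu := by omega
      exact le_min hmu hcond.1
    · simp at hg
  · rintro ⟨d, i, hd1, hmid, hilt, hdle, hmr, rfl⟩
    have hfl : PySem.Int.floordiv ((w.length : Int) - (i : Int)) (max 1 mr) ≤ (w.length : Int) - (i : Int) := by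
      rw [PySem.Int.floordiv_eq_ediv_of_pos hdenom]
      exact Int.ediv_le_self _ (by omega)
    have hmono : PySem.Int.floordiv ((w.length : Int) - (i : Int)) (max 1 mr)
        ≤ PySem.Int.floordiv ((w.length : Int)) (max 1 mr) := by
      rw [PySem.Int.floordiv_eq_ediv_of_pos hdenom, PySem.Int.floordiv_eq_ediv_of_pos hdenom]
      exact Int.ediv_le_ediv hdenom (by omega)
    refine ⟨(d : Int), ⟨hmid, by omega⟩, (i : Int), ⟨by omega, by omega⟩, ?_⟩
    rw [Int.toNat_natCast, gB_eq w mr i d, if_pos ⟨by omega, hmr⟩]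

theorem foldl_stepBest_eq_of_mem_iff (L1 L2 : List PVCand)
    (h : ∀ c, c ∈ L1 ↔ c ∈ L2) :
    L1.foldl stepBest none = L2.foldl stepBest none := by
  cases hA : L1.foldl stepBest none with
  | none =>
    have hnil := (foldl_stepBest_eq_none L1 none hA).2
    cases hB : L2.foldl stepBest none with
    | none => rfl
    | some cB =>
      exfalso
      rcases foldl_stepBest_mem L2 none cB hB with h1 | h1
      · cases h1
      · have : cB ∈ L1 := (h cB).mpr h1
        rw [hnil] at this
        cases this
  | some cA =>
    cases hB : L2.foldl stepBest none with
    | none =>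
      exfalso
      have hnil := (foldl_stepBest_eq_none L2 none hB).2
      rcases foldl_stepBest_mem L1 none cA hA with h1 | h1
      · cases h1
      · have : cA ∈ L2 := (h cA).mp h1
        rw [hnil] at this
        cases this
    | some cB =>
      have hmemA : cA ∈ L1 := by
        rcases foldl_stepBest_mem L1 none cA hA with h1 | h1
        · cases h1
        · exact h1
      have hmemB : cB ∈ L2 := by
        rcases foldl_stepBest_mem L2 none cB hB with h1 | h1
        · cases h1
        · exact h1
      by_cases hEq : cA = cB
      · rw [hEq]
      · exfalso
        have hUA := (foldl_stepBest_unbeaten L1 none cA hA).1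
        have hUB := (foldl_stepBest_unbeaten L2 none cB hB).1
        rcases candGT_total cA cB hEq with hgt | hgt
        · have := hUB cA ((h cA).mp hmemA)
          rw [hgt] at this; cases this
        · have := hUA cB ((h cB).mpr hmemB)
          rw [hgt] at this; cases this

-- ===== VERDICT (by name: the statement is the Claim_ definition above) =====
theorem find_min_repeat_unit_anywhere_py_spec : Claim_equal_find_min_repeat_unit_anywhere_py := by
  unfold Claim_equal_find_min_repeat_unit_anywhere_py
  intro w mu mi mr _hDom hPre
  unfold Spec_find_min_repeat_unit_anywhere_py
  simp only [find_min_repeat_unit_anywhere_py, find_min_repeat_unit_anywhere_py_alt]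
  by_cases hn0 : PySem.List.len w = 0
  · rw [if_pos hn0, if_pos hn0]
  · rw [if_neg hn0, if_neg hn0]
    rw [A_best_eq w mu mi mr]
    by_cases hmi : 1 ≤ mi
    · rw [B_best_eq w mu mi mr hmi]
      have hmem : ∀ c, c ∈ pvLA w mu mi mr ↔ c ∈ pvLB w mu mi mr := fun c =>
        (memA w mu mi mr hmi c).trans (memB w mu mi mr hmi c).symm
      rw [foldl_stepBest_eq_of_mem_iff (pvLA w mu mi mr) (pvLB w mu mi mr) hmem]
    · have hdenom : (0 : Int) < max 1 mr := by omega
      have htop : min mu (PySem.Int.floordiv (PySem.List.len w) (max 1 mr)) < mi := by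
        rcases hPre with h | h | h
        · exfalso; apply hn0; rw [h]; rfl
        · omega
        · exact h
      have hLA : pvLA w mu mi mr = [] := by
        rw [List.eq_nil_iff_forall_not_mem]
        intro c hc
        unfold pvLA at hc
        simp only [List.mem_flatMap, List.mem_filterMap, PySem.List.mem_pyRange_one,
          PySem.List.len_eq] at hc
        obtain ⟨iI, hiI, dl, hdl, _⟩ := hc
        rw [PySem.List.len_eq] at htop
        have hmono : PySem.Int.floordiv ((w.length : Int) - iI) (max 1 mr)
            ≤ PySem.Int.floordiv ((w.length : Int)) (max 1 mr) := by
          rw [PySem.Int.floordiv_eq_ediv_of_pos hdenom, PySem.Int.floordiv_eq_ediv_of_pos hdenom]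
          exact Int.ediv_le_ediv hdenom (by omega)
        omega
      rw [hLA]
      rw [PySem.List.pyRange_one_eq_nil (by omega)]
      rfl
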